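-- pv_equiv track=rewrite | github.com/peteroupc/peteroupc.github.io | betadist.py | crudelog
-- ===== SOURCE A (Python) =====
-- ArcTanHTable = [
--     0,  # Infinity
--     294906490,
--     137123709,
--     67461703,
--     33598225,
--     16782680,
--     8389290,
--     4194389,
--     2097162,
--     1048577,
--     524288,
--     262144,
--     131072,
--     65536,
--     32768,
--     16384,
--     8192,
--     4096,
--     2048,
--     1024,
--     512,
--     256,
--     128,
--     64,
--     32,
--     16,
--     8,
--     4,
--     2,
--     1,
-- ]
--
-- def _roundedshiftraw(a, shift):
--     aa = abs(a)
--     ret = aa >> shift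
--     frac = aa & ((1 << shift) - 1)
--     # Divisor's least significant bit is even
--     if frac > (1 << (shift - 1)) or (frac == (1 << (shift - 1)) and (ret & 1) == 1):
--         ret += 1
--     if a < 0:
--         ret = -ret
--     return ret
--
-- CRUDELOG_BITS = 16
--
-- CRUDELOG_LOGMIN = (1 << CRUDELOG_BITS) * 15 // 100
--
-- CRUDELOG_LOG2BITS = 45426
--
-- CRUDELOG_ARCTANFRAC = 29
--
-- CRUDELOG_ARCTANBITDIFF = CRUDELOG_ARCTANFRAC - CRUDELOG_BITS
--
-- def crudelog(av):
--     # The CORDIC way to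
--     # calculate an approximation of the natural logarithm of av/2^_bits.
--     # When _bits=16, crudelog is accurate to 2/2^16 for av in [1, 271],
--     # and to 1/2^16 in [272, 65536].
--     if av <= 0:
--         raise ValueError
--     onebits = 1 << CRUDELOG_BITS
--     if av == onebits:
--         return 0
--     if av >= onebits:
--         return crudelog(av // 2) + CRUDELOG_LOG2BITS + 1
--     if av < CRUDELOG_LOGMIN:
--         return crudelog(av * 2) - CRUDELOG_LOG2BITS
--     avx = av << CRUDELOG_ARCTANBITDIFF
--     rx = avx + (1 << CRUDELOG_ARCTANFRAC)
--     ry = avx - (1 << CRUDELOG_ARCTANFRAC)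
--     rz = 0
--     for i in range(1, len(ArcTanHTable)):
--         iters = 2 if i > 1 and ((i - 1) % 3) == 0 else 1
--         for m in range(iters):
--             x = rx >> i
--             y = ry >> i
--             if ry <= 0:
--                 rx += y
--                 ry += x
--                 rz -= ArcTanHTable[i]
--             else:
--                 rx -= y
--                 ry -= x
--                 rz += ArcTanHTable[i]
--     return _roundedshiftraw(rz, CRUDELOG_ARCTANBITDIFF - 1)
-- ===== SOURCE B (Python) =====
-- # B: recursion flattened to one while-loop with an integer offset accumulator,
-- # and the CORDIC schedule precomputed as a flat index list.
--
-- ArcTanHTable = [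
--     0, 294906490, 137123709, 67461703, 33598225, 16782680, 8389290, 4194389,
--     2097162, 1048577, 524288, 262144, 131072, 65536, 32768, 16384, 8192,
--     4096, 2048, 1024, 512, 256, 128, 64, 32, 16, 8, 4, 2, 1,
-- ]
--
-- CRUDELOG_BITS = 16
-- CRUDELOG_LOGMIN = (1 << CRUDELOG_BITS) * 15 // 100
-- CRUDELOG_LOG2BITS = 45426
-- CRUDELOG_ARCTANFRAC = 29
-- CRUDELOG_ARCTANBITDIFF = CRUDELOG_ARCTANFRAC - CRUDELOG_BITS
--
-- # flat CORDIC schedule: index i appears twice when i > 1 and (i - 1) % 3 == 0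
-- _SCHEDULE = [i for i in range(1, len(ArcTanHTable))
--              for _ in range(2 if i > 1 and (i - 1) % 3 == 0 else 1)]
--
-- def _rounddiv(a, shift):
--     # round-half-to-even division of a by 2**shift, via divmod
--     q, r = divmod(abs(a), 1 << shift)
--     if 2 * r > (1 << shift) or (2 * r == (1 << shift) and q % 2 == 1):
--         q += 1
--     return -q if a < 0 else q
--
-- def crudelog(av):
--     if av <= 0:
--         raise ValueError
--     onebits = 1 << CRUDELOG_BITS
--     offset = 0
--     while True:
--         if av == onebits:
--             return offset
--         if av >= onebits:
--             av //= 2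
--             offset += CRUDELOG_LOG2BITS + 1
--         elif av < CRUDELOG_LOGMIN:
--             av *= 2
--             offset -= CRUDELOG_LOG2BITS
--         else:
--             break
--     avx = av << CRUDELOG_ARCTANBITDIFF
--     rx = avx + (1 << CRUDELOG_ARCTANFRAC)
--     ry = avx - (1 << CRUDELOG_ARCTANFRAC)
--     rz = 0
--     for i in _SCHEDULE:
--         x = rx >> i
--         y = ry >> i
--         if ry <= 0:
--             rx += y
--             ry += x
--             rz -= ArcTanHTable[i]
--         else:
--             rx -= y
--             ry -= x
--             rz += ArcTanHTable[i]
--     return _rounddiv(rz, CRUDELOG_ARCTANBITDIFF - 1) + offset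
-- ===== Notes on version B (the rewrite author's own statement) =====
-- stated objective: alternative
-- what changed: Replaced the tail recursion that renormalises av with an explicit while-loop accumulating an integer offset, and replaced the nested CORDIC loop (range over i with an inner repeat loop) by a single fold over a precomputed flat index schedule; rounding helper rewritten via divmod.
import Mathlib
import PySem

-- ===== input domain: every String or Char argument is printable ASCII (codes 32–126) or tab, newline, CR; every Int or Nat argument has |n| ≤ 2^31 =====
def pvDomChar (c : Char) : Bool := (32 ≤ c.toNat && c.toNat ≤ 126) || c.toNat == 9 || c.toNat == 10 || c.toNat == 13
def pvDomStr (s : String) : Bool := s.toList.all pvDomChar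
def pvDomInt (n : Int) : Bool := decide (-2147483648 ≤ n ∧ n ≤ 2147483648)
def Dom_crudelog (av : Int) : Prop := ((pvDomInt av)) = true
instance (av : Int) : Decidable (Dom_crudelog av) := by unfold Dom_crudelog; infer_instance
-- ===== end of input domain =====

-- B replaces A's tail recursion by a while-loop with an integer offset accumulator and
-- folds the CORDIC iteration over a precomputed flat index schedule (objective: alternative).

-- ArcTanHTable (same module constant, used by both ports)
def pvTable : List Int :=
  [0, 294906490, 137123709, 67461703, 33598225, 16782680, 8389290, 4194389,
   2097162, 1048577, 524288, 262144, 131072, 65536, 32768, 16384, 8192,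
   4096, 2048, 1024, 512, 256, 128, 64, 32, 16, 8, 4, 2, 1]

-- CORDIC step: the loop body both Python sources contain verbatim.
-- `rx >> i` is Int's `>>>` (arithmetic shift, Python-exact also on negatives);
-- i ∈ [1, 29] at every call, so `i.toNat` and the table lookup's default are exact.
def cordicStep (i : Int) (st : Int × Int × Int) : Int × Int × Int :=
  let x := st.1 >>> i.toNat
  let y := st.2.1 >>> i.toNat
  if st.2.1 ≤ 0 then
    (st.1 + y, st.2.1 + x, st.2.2 - (PySem.List.pyGet? pvTable i).getD 0)
  else
    (st.1 - y, st.2.1 - x, st.2.2 + (PySem.List.pyGet? pvTable i).getD 0)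

-- ===== PORT A =====
-- _roundedshiftraw; only called with shift = 12. PySem.Int.band is Python's `&`.
def roundedshiftrawA (a : Int) (shift : Int) : Int :=
  let aa := |a|
  let ret := aa >>> shift.toNat
  let frac := PySem.Int.band aa (((1:Int) <<< shift.toNat) - 1)
  let ret :=
    if frac > (1:Int) <<< (shift - 1).toNat ∨
       (frac = (1:Int) <<< (shift - 1).toNat ∧ PySem.Int.band ret 1 = 1) then ret + 1 else ret
  if a < 0 then -ret else ret

-- the CORDIC part of A (the code after the two recursive renormalisation branches)
def cordicCoreA (av : Int) : Int :=
  let avx := av <<< (13 : Nat)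
  let rx := avx + ((1:Int) <<< (29 : Nat))
  let ry := avx - ((1:Int) <<< (29 : Nat))
  let st := List.foldl
    (fun st i =>
      let iters : Int := if 1 < i ∧ PySem.Int.mod (i - 1) 3 = 0 then 2 else 1
      List.foldl (fun st2 _ => cordicStep i st2) st (PySem.List.pyRange 0 iters 1))
    (rx, ry, (0 : Int)) (PySem.List.pyRange 1 30 1)
  roundedshiftrawA st.2.2 (13 - 1)

def crudeMeasure (av : Int) : Nat :=
  if 65536 ≤ av then (av + 65536).toNat else (65536 - av).toNat

-- Python raises ValueError on av ≤ 0 (excluded by Pre_); the guard returns 0 there for totality.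
def crudelog (av : Int) : Int :=
  if av ≤ 0 then 0
  else if av = 65536 then 0
  else if 65536 ≤ av then crudelog (PySem.Int.floordiv av 2) + 45426 + 1
  else if av < 9830 then crudelog (av * 2) - 45426
  else cordicCoreA av
termination_by crudeMeasure av
decreasing_by
  · rw [PySem.Int.floordiv_eq_ediv_of_pos (by norm_num)]
    unfold crudeMeasure; split_ifs <;> omega
  · unfold crudeMeasure; split_ifs <;> omega

-- ===== PORT B =====
-- _rounddiv: divmod-based round-half-to-even; divisor 2^shift > 0, |a| ≥ 0, so Lean's
-- Euclidean / and % coincide with Python's divmod here.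
def rounddivB (a : Int) (shift : Int) : Int :=
  let q := |a| / ((1:Int) <<< shift.toNat)
  let r := |a| % ((1:Int) <<< shift.toNat)
  let q :=
    if 2 * r > (1:Int) <<< shift.toNat ∨
       (2 * r = (1:Int) <<< shift.toNat ∧ PySem.Int.mod q 2 = 1) then q + 1 else q
  if a < 0 then -q else q

-- _SCHEDULE: flat CORDIC index list
def pvSchedule : List Int :=
  (PySem.List.pyRange 1 30 1).flatMap
    (fun i => List.replicate (if 1 < i ∧ PySem.Int.mod (i - 1) 3 = 0 then 2 else 1) i)

-- the while-loop of B; the `av ≤ 0` guard is an unreachable totality guard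
-- (the loop is only entered with 1 ≤ av, on which it is Python-exact).
def crudelogLoop (av : Int) (offset : Int) : Int :=
  if av ≤ 0 then 0
  else if av = 65536 then offset
  else if 65536 ≤ av then crudelogLoop (PySem.Int.floordiv av 2) (offset + (45426 + 1))
  else if av < 9830 then crudelogLoop (av * 2) (offset - 45426)
  else
    let avx := av <<< (13 : Nat)
    let st := List.foldl (fun st i => cordicStep i st)
      (avx + ((1:Int) <<< (29 : Nat)), avx - ((1:Int) <<< (29 : Nat)), (0 : Int)) pvSchedule
    rounddivB st.2.2 (13 - 1) + offset
termination_by crudeMeasure av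
decreasing_by
  · rw [PySem.Int.floordiv_eq_ediv_of_pos (by norm_num)]
    unfold crudeMeasure; split_ifs <;> omega
  · unfold crudeMeasure; split_ifs <;> omega

-- Python B raises ValueError on av ≤ 0 (excluded by Pre_); 0 is a totality placeholder.
def crudelog_alt (av : Int) : Int :=
  if av ≤ 0 then 0 else crudelogLoop av 0

-- ===== PRECONDITION & SPEC =====
-- A raises ValueError exactly on av ≤ 0 (and so does B); Pre_ excludes those inputs.
def Pre_crudelog (av : Int) : Prop := 1 ≤ av
instance (av : Int) : Decidable (Pre_crudelog av) := by unfold Pre_crudelog; infer_instance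
def pvWitness_crudelog : Int := 5

def Spec_crudelog (av : Int) (out : Int) : Prop := out = crudelog_alt av
instance (av : Int) (out : Int) : Decidable (Spec_crudelog av out) := by unfold Spec_crudelog; infer_instance

-- ===== CLAIM (what is proved, stated in full; the proofs are below) =====
def Claim_equal_crudelog : Prop := ∀ (av : Int), Dom_crudelog av → Pre_crudelog av → Spec_crudelog av (crudelog av)

-- ===== LEMMAS AND PROOFS =====

-- the two rounding helpers agree everywhere (at the one shift both use)
theorem roundAB_eq (a : Int) : roundedshiftrawA a 12 = rounddivB a 12 := by
  unfold roundedshiftrawA rounddivB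
  simp only [show ((1:Int) <<< Int.toNat 12) = 4096 by decide,
    show ((1:Int) <<< ((12:Int) - 1).toNat) = 2048 by decide,
    show (4096:Int) - 1 = 4095 by decide]
  rw [show (Int.toNat 12) = (12:Nat) by decide]
  have h0 : (0:Int) ≤ |a| := abs_nonneg a
  obtain ⟨n, hn⟩ := Int.eq_ofNat_of_zero_le h0
  have hsh : |a| >>> (12:Nat) = |a| / 4096 := by
    rw [hn, show ((n:Int) >>> (12:Nat)) = ((n >>> 12 : Nat) : Int) from rfl]
    simp [Nat.shiftRight_eq_div_pow]
    try omega
  have hband : PySem.Int.band |a| 4095 = |a| % 4096 := by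
    rw [hn, show ((4095:Int)) = ((4095:Nat):Int) from rfl, PySem.Int.band_natCast]
    have := Nat.and_two_pow_sub_one_eq_mod n 12
    norm_num at this
    omega
  have hb1 : PySem.Int.band (|a| / 4096) 1 = PySem.Int.mod (|a| / 4096) 2 :=
    PySem.Int.band_one _
  have hm2 : PySem.Int.mod (|a| / 4096) 2 = |a| / 4096 % 2 :=
    PySem.Int.mod_eq_emod_of_pos (by norm_num)
  rw [hband, hsh, hb1, hm2]
  have hq0 : (0:Int) ≤ |a| / 4096 := Int.ediv_nonneg h0 (by norm_num)
  have hr : (0:Int) ≤ |a| % 4096 ∧ |a| % 4096 < 4096 :=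
    ⟨Int.emod_nonneg _ (by norm_num), Int.emod_lt_of_pos _ (by norm_num)⟩
  split_ifs with h1 h2 <;> first
  | rfl
  | (exfalso; omega)

-- folding the nested CORDIC loop equals folding over the flattened schedule
theorem fold_sched (l : List Int) (st : Int × Int × Int) :
    List.foldl
      (fun st i =>
        let iters : Int := if 1 < i ∧ PySem.Int.mod (i - 1) 3 = 0 then 2 else 1
        List.foldl (fun st2 _ => cordicStep i st2) st (PySem.List.pyRange 0 iters 1))
      st l
    = List.foldl (fun st i => cordicStep i st) st
        (l.flatMap (fun i => List.replicate (if 1 < i ∧ PySem.Int.mod (i - 1) 3 = 0 then 2 else 1) i)) := by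
  induction l generalizing st with
  | nil => rfl
  | cons i t ih =>
      simp only [List.foldl_cons, List.flatMap_cons, List.foldl_append]
      rw [← ih]
      congr 1
      by_cases hc : 1 < i ∧ PySem.Int.mod (i - 1) 3 = 0
      · rw [if_pos hc, if_pos hc, show PySem.List.pyRange 0 2 1 = [0, 1] by decide]
        rfl
      · rw [if_neg hc, if_neg hc, show PySem.List.pyRange 0 1 1 = [0] by decide]
        rfl

-- A's CORDIC core equals B's (schedule-folded) CORDIC core
theorem cordic_eq (av : Int) :
    cordicCoreA av
    = rounddivB (List.foldl (fun st i => cordicStep i st)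
        (av <<< (13:Nat) + ((1:Int) <<< (29:Nat)), av <<< (13:Nat) - ((1:Int) <<< (29:Nat)), (0:Int))
        pvSchedule).2.2 (13 - 1) := by
  unfold cordicCoreA pvSchedule
  dsimp only []
  rw [fold_sched]
  exact roundAB_eq _

-- the loop with accumulator computes A's recursion plus the accumulator
theorem loop_eq (av : Int) (offset : Int) (h : 1 ≤ av) :
    crudelogLoop av offset = crudelog av + offset := by
  fun_induction crudelogLoop av offset with
  | case1 av offset h0 => exact absurd h0 (by omega)
  | case2 offset h0 =>
      rw [crudelog, if_neg (by norm_num), if_pos rfl]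
      ring
  | case3 av offset h0 h1 h2 ih =>
      rw [crudelog]
      simp only [if_neg h0, if_neg h1, if_pos h2]
      have hd : 1 ≤ PySem.Int.floordiv av 2 := by
        rw [PySem.Int.floordiv_eq_ediv_of_pos (by norm_num)]
        omega
      rw [ih hd]
      ring
  | case4 av offset h0 h1 h2 h3 ih =>
      rw [crudelog]
      simp only [if_neg h0, if_neg h1, if_neg h2, if_pos h3]
      rw [ih (by omega)]
      ring
  | case5 av offset h0 h1 h2 h3 =>
      rw [crudelog]
      simp only [if_neg h0, if_neg h1, if_neg h2, if_neg h3]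
      rw [cordic_eq]

-- ===== VERDICT (by name: the statement is the Claim_ definition above) =====
theorem crudelog_spec : Claim_equal_crudelog := by
  intro av _ hpre
  unfold Pre_crudelog at hpre
  unfold Spec_crudelog crudelog_alt
  rw [if_neg (by omega : ¬ av ≤ 0), loop_eq av 0 hpre]
  ring
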